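-- pv_equiv track=rewrite | github.com/Axariosu/food-bot | util/uddercodeutil.py | prehash
-- ===== SOURCE A (Python) =====
-- def prehash(s):
--     """
--     Given a string s:
--     Returns a tuple of unique elements separated by count.
--     For example, a string of format AABC or ABBC will return (2, 1, 1),
--     AAAB and ABBB will return (3, 1), ABCD will return (1, 1, 1, 1).
--     """
--     res = {}
--     for c in s:
--         if c not in res:
--             res[c] = 1
--         else:
--             res[c] += 1
--     return tuple(sorted(res.values()))[::-1]
-- ===== SOURCE B (Python) =====
-- def prehash(s):
--     """
--     Given a string s:
--     Returns a tuple of unique elements separated by count.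
--     Sort the characters so equal ones are adjacent, then run-length
--     scan the sorted list and sort the run lengths descending.
--     """
--     counts = []
--     chars = sorted(s)
--     while chars:
--         run = 1
--         while run < len(chars) and chars[run] == chars[0]:
--             run += 1
--         counts.append(run)
--         chars = chars[run:]
--     return tuple(sorted(counts, reverse=True))
-- ===== Notes on version B (the rewrite author's own statement) =====
-- stated objective: alternative
-- what changed: Replaced A's dict-based frequency counting followed by ascending sort + reversal with sorting the characters first, run-length scanning the sorted list with a two-level while loop, and sorting the run lengths descending.
import Mathlib
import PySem

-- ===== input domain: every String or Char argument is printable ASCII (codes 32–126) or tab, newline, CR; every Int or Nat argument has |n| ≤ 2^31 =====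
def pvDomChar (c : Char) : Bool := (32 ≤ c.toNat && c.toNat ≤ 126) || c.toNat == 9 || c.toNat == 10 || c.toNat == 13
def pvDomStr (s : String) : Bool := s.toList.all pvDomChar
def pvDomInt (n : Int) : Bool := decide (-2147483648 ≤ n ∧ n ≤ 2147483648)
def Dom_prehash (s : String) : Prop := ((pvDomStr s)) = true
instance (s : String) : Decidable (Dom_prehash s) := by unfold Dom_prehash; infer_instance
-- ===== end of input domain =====

-- B replaces A's hash-map frequency count by sort-then-run-length-scan (alternative traversal, same result).


-- ===== PORT A =====
-- res = {}; for c in s: if c not in res: res[c] = 1 else: res[c] += 1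
-- return tuple(sorted(res.values()))[::-1]
def prehash (s : String) : List Int :=
  let res : PySem.Dict Char Int :=
    s.toList.foldl
      (fun d c => if d.contains c = false then d.insert c 1 else d.insert c (d.getD c 0 + 1))
      PySem.Dict.empty
  (PySem.List.slice? (PySem.List.sorted res.values (fun v => v) false) none none (-1)).getD []

-- ===== PORT B =====
-- inner while: run = length of the leading block of chars equal to chars[0]; chars = chars[run:]
def pvRunLengths : List Char → List Int
  | [] => []
  | c :: rest =>
    ((rest.takeWhile (fun x => x == c)).length + 1 : Int) ::
      pvRunLengths (rest.dropWhile (fun x => x == c))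
termination_by l => l.length
decreasing_by
  exact Nat.lt_succ_of_le (List.length_dropWhile_le _ _)

def prehash_alt (s : String) : List Int :=
  PySem.List.sorted (pvRunLengths (PySem.List.sorted s.toList (fun c => c) false)) (fun v => v) true

-- ===== PRECONDITION & SPEC =====
def Spec_prehash (s : String) (out : List Int) : Prop := out = prehash_alt s
instance (s : String) (out : List Int) : Decidable (Spec_prehash s out) := by unfold Spec_prehash; infer_instance

-- ===== CLAIM (what is proved, stated in full; the proofs are below) =====
def Claim_equal_prehash : Prop := ∀ (s : String), Dom_prehash s → Spec_prehash s (prehash s)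

-- ===== LEMMAS AND PROOFS =====

-- the first element surviving dropWhile fails the predicate
lemma pv_dropWhile_head_false {l : List Char} {p : Char → Bool} {d : Char} {ds : List Char}
    (h : l.dropWhile p = d :: ds) : p d = false := by
  have h2 := List.head_dropWhile_not p (l := l) (by simp [h])
  simpa [h] using h2

-- A's branching update loop is exactly Counter(s): on a fresh key getD is the default, so both branches insert getD+1.
lemma pv_fold_eq_counter (xs : List Char) :
    xs.foldl
      (fun d c => if d.contains c = false then d.insert c 1 else d.insert c (d.getD c 0 + 1))
      PySem.Dict.empty = PySem.Dict.counter xs := by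
  rw [← PySem.Dict.foldl_insert_getD_add_one_eq_counter]
  have hf : (fun (d : PySem.Dict Char Int) c =>
      if d.contains c = false then d.insert c 1 else d.insert c (d.getD c 0 + 1))
      = fun d c => d.insert c (d.getD c 0 + 1) := by
    funext d c
    by_cases hc : d.contains c = false
    · simp [hc, PySem.Dict.getD_of_not_contains d (0 : Int) hc]
    · simp [hc]
  rw [hf]

-- run-length scan of a ≤-sorted list is, up to permutation, the list of per-distinct-character counts
lemma pv_run_perm : ∀ (ys : List Char), ys.Pairwise (· ≤ ·) →
    (pvRunLengths ys).Perm ((PySem.Set.ofList ys).map (fun c => (ys.count c : Int)))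
  | [], _ => by simp [pvRunLengths]
  | c :: rest, h => by
    have ⟨hcle, hrp⟩ := List.pairwise_cons.1 h
    have hrest : rest.takeWhile (fun x => x == c) ++ rest.dropWhile (fun x => x == c) = rest :=
      List.takeWhile_append_dropWhile
    set t := rest.takeWhile (fun x => x == c) with ht
    set dr := rest.dropWhile (fun x => x == c) with hdr
    have htc : ∀ x ∈ t, x = c := fun x hx => by
      have := List.mem_takeWhile_imp hx; simpa using this
    have hdrp : dr.Pairwise (· ≤ ·) := hrp.sublist (List.dropWhile_sublist _)
    have hcdr : c ∉ dr := by
      intro hc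
      obtain ⟨d, ds, hde⟩ := List.exists_cons_of_ne_nil (List.ne_nil_of_mem hc)
      have hdc : d ≠ c := by
        simpa using pv_dropWhile_head_false (hdr ▸ hde : rest.dropWhile (fun x => x == c) = d :: ds)
      rcases List.mem_cons.1 (hde ▸ hc) with rfl | hcds
      · exact hdc rfl
      · have hdlec : d ≤ c := (List.pairwise_cons.1 (hde ▸ hdrp)).1 c hcds
        have hcled : c ≤ d := hcle d (by rw [← hrest, hde]; exact List.mem_append_right _ (List.mem_cons_self))
        exact hdc (le_antisymm hdlec hcled)
    have hcount_t : t.count c = t.length := List.count_eq_length.mpr (fun b hb => (htc b hb).symm)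
    have hcount_c : (c :: rest).count c = t.length + 1 := by
      rw [← hrest]
      simp [List.count_append, hcount_t, List.count_eq_zero.2 hcdr]
    have hcount_other : ∀ x ∈ dr, (c :: rest).count x = dr.count x := by
      intro x hx
      have hxc : x ≠ c := fun e => hcdr (e ▸ hx)
      have hxt : t.count x = 0 := List.count_eq_zero.2 (fun hxt => hxc (htc x hxt))
      rw [← hrest]
      have hcx : ¬ c = x := fun e => hxc e.symm
      simp [List.count_append, hxt, hcx]
    have hset : (PySem.Set.ofList (c :: rest)).Perm (c :: PySem.Set.ofList dr) := by
      rw [List.perm_ext_iff_of_nodup (PySem.Set.nodup_ofList _)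
        (List.nodup_cons.2 ⟨by simpa [PySem.Set.mem_ofList] using hcdr, PySem.Set.nodup_ofList _⟩)]
      intro a
      simp only [PySem.Set.mem_ofList, List.mem_cons]
      constructor
      · rintro (rfl | ha)
        · exact Or.inl rfl
        · rw [← hrest] at ha
          rcases List.mem_append.1 ha with hat | had
          · exact Or.inl (htc a hat)
          · exact Or.inr had
      · rintro (rfl | ha)
        · exact Or.inl rfl
        · exact Or.inr (by rw [← hrest]; exact List.mem_append_right _ ha)
    have hih := pv_run_perm dr hdrp
    have hmap : (PySem.Set.ofList dr).map (fun x => (dr.count x : Int))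
        = (PySem.Set.ofList dr).map (fun x => ((c :: rest).count x : Int)) :=
      List.map_congr_left (fun x hx => by
        rw [hcount_other x ((PySem.Set.mem_ofList _ _).1 hx)])
    have hstep : pvRunLengths (c :: rest)
        = ((t.length + 1 : Int)) :: pvRunLengths dr := by
      rw [pvRunLengths]
    rw [hstep]
    refine List.Perm.trans ?_ ((hset.map _).symm)
    simp only [List.map_cons]
    have : ((c :: rest).count c : Int) = (t.length + 1 : Int) := by rw [hcount_c]; push_cast; ring
    rw [this]
    exact (hih.trans (by rw [hmap])).cons _
termination_by ys => ys.length
decreasing_by simpa using Nat.lt_succ_of_le (List.length_dropWhile_le _ _)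

-- ===== VERDICT (by name: the statement is the Claim_ definition above) =====

theorem prehash_spec : Claim_equal_prehash := by
  intro s _
  unfold Spec_prehash prehash prehash_alt
  simp only []
  rw [pv_fold_eq_counter, PySem.List.slice?_none_none_neg_one]
  simp only [Option.getD_some]
  set xs := s.toList with hxs
  have hv : (PySem.Dict.counter xs).values
      = (PySem.Set.ofList xs).map (fun k => (xs.count k : Int)) := by
    rw [PySem.Dict.values_eq_map_keys _ (PySem.Dict.nodup_keys_counter xs) 0,
      PySem.Dict.keys_counter]
    exact List.map_congr_left (fun k _ => PySem.Dict.getD_counter xs k)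
  have hsp : (PySem.List.sorted xs (fun c => c) false).Pairwise (· ≤ ·) := by
    simpa using PySem.List.sorted_pairwise xs (fun c => c)
  have hR := pv_run_perm (PySem.List.sorted xs (fun c => c) false) hsp
  have hcnt : (PySem.Set.ofList (PySem.List.sorted xs (fun c => c) false)).map
        (fun c => ((PySem.List.sorted xs (fun c => c) false).count c : Int))
      = (PySem.Set.ofList (PySem.List.sorted xs (fun c => c) false)).map
        (fun c => (xs.count c : Int)) :=
    List.map_congr_left (fun x _ => by
      rw [(PySem.List.sorted_perm xs (fun c => c) false).count_eq])
  have hsets : (PySem.Set.ofList (PySem.List.sorted xs (fun c => c) false)).Perm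
      (PySem.Set.ofList xs) := by
    rw [List.perm_ext_iff_of_nodup (PySem.Set.nodup_ofList _) (PySem.Set.nodup_ofList _)]
    intro a
    simp [PySem.Set.mem_ofList, PySem.List.mem_sorted]
  have hRV : (pvRunLengths (PySem.List.sorted xs (fun c => c) false)).Perm
      ((PySem.Dict.counter xs).values) := by
    rw [hv]
    exact (hR.trans (hcnt ▸ (hsets.map _)))
  set R := pvRunLengths (PySem.List.sorted xs (fun c => c) false) with hRdef
  have hkey : PySem.List.sorted ((PySem.Dict.counter xs).values) (fun v => v) false
      = (PySem.List.sorted R (fun v => v) true).reverse := by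
    apply PySem.List.sorted_id_eq_of_perm_of_pairwise
    · exact (List.reverse_perm _).trans ((PySem.List.sorted_perm R (fun v => v) true).trans hRV)
    · exact List.pairwise_reverse.2 (PySem.List.sorted_pairwise_rev R (fun v => v))
  rw [hkey, List.reverse_reverse]
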